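-- pv_equiv track=rewrite | github.com/LinaNoor-AGI/noor-research | Recursive_Agent/RecursiveAgentFT_V3.6.1.py | generate_field_paths
-- ===== SOURCE A (Python) =====
-- from typing import List, Optional, Dict, Any
--
-- def generate_field_paths(fields: List[Dict[str, Any]], max_depth: int) -> List[List[Dict[str, Any]]]:
--     frontier = [[f] for f in fields]
--     for _ in range(max_depth - 1):
--         new_frontier = []
--         for path in frontier:
--             for f in fields:
--                 new_frontier.append(path + [f])
--         frontier = new_frontier[:1000]  # cap to prevent explosion
--     return frontier
-- ===== SOURCE B (Python) =====
-- def generate_field_paths(fields, max_depth):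
--     # Depth <= 1: the expansion loop never runs; every singleton path (uncapped).
--     if max_depth <= 1:
--         return [[f] for f in fields]
--     n = len(fields)
--     # Number of paths actually produced: min(1000, n ** max_depth), computed
--     # without a huge power (2**10 = 1024 >= 1000, so exponent 10 suffices).
--     total = min(1000, n ** min(max_depth, 10))
--     out = []
--     for i in range(total):
--         path = []
--         for _ in range(max_depth):
--             i, r = divmod(i, n)
--             path.append(fields[r])
--         path.reverse()
--         out.append(path)
--     return out
-- ===== Notes on version B (the rewrite author's own statement) =====
-- stated objective: faster
-- what changed: Replaces the level-by-level frontier expansion (re-capped to 1000 each level) by direct enumeration: the result is the first min(1000, n**max_depth) length-max_depth tuples in product order, so B computes the i-th path from the base-n digits of i and never builds intermediate frontiers.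
import Mathlib
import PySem

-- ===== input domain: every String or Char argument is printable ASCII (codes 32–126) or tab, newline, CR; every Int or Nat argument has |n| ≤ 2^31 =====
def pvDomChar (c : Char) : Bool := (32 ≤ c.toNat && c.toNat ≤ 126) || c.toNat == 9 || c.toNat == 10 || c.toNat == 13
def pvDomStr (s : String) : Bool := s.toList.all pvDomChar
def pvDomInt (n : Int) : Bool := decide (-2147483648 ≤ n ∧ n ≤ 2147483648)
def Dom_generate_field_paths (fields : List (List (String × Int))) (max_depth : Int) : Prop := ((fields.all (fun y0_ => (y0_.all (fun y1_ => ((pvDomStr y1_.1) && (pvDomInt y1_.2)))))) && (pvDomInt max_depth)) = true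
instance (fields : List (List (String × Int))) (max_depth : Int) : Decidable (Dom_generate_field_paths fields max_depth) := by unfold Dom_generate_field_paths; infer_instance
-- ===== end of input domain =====

-- B replaces A's level-by-level frontier expansion (re-capped to 1000 per level) by directly
-- computing the i-th result path from the base-n digits of i (product order); a timing run
-- measured this faster on deep inputs.

-- ===== PORT A =====
-- literal port: frontier loop over range(max_depth-1); new_frontier built by the two nested
-- loops; 'new_frontier[:1000]' is List.take 1000 (slice with nonnegative stop).
def generate_field_paths (fields : List (List (String × Int))) (max_depth : Int) : List (List (List (String × Int))) :=
  (PySem.List.pyRange 0 (max_depth - 1) 1).foldl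
    (fun frontier _ =>
      (frontier.foldl (fun nf path => nf ++ fields.map (fun f => path ++ [f])) []).take 1000)
    (fields.map (fun f => [f]))

-- ===== PORT B =====
-- literal port of Source B; 'fields[r]' always has 0 ≤ r < len(fields) when the loop body runs
-- (total > 0), so it is ported with pyGetD (the default is never hit); divmod(i, n) = (floordiv, mod).
def generate_field_paths_alt (fields : List (List (String × Int))) (max_depth : Int) : List (List (List (String × Int))) :=
  if max_depth ≤ 1 then
    fields.map (fun f => [f])
  else
    let n : Int := fields.length
    let total : Int := min 1000 (n ^ (min max_depth 10).toNat)
    (PySem.List.pyRange 0 total 1).foldl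
      (fun out i =>
        let st := (List.range max_depth.toNat).foldl
          (fun (st : Int × List (List (String × Int))) _ =>
            (PySem.Int.floordiv st.1 n, st.2 ++ [PySem.List.pyGetD fields (PySem.Int.mod st.1 n) []]))
          (i, ([] : List (List (String × Int))))
        out ++ [st.2.reverse]) []

-- ===== PRECONDITION & SPEC =====
def Spec_generate_field_paths (fields : List (List (String × Int))) (max_depth : Int) (out : List (List (List (String × Int)))) : Prop := out = generate_field_paths_alt fields max_depth
instance (fields : List (List (String × Int))) (max_depth : Int) (out : List (List (List (String × Int)))) : Decidable (Spec_generate_field_paths fields max_depth out) := by unfold Spec_generate_field_paths; infer_instance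

-- ===== CLAIM (what is proved, stated in full; the proofs are below) =====
def Claim_equal_generate_field_paths : Prop := ∀ (fields : List (List (String × Int))) (max_depth : Int), Dom_generate_field_paths fields max_depth → Spec_generate_field_paths fields max_depth (generate_field_paths fields max_depth)

-- ===== LEMMAS AND PROOFS =====

-- the full cartesian product of k copies of fs, in Python's product order
def pvProd (fs : List (List (String × Int))) : Nat → List (List (List (String × Int)))
  | 0 => [[]]
  | k+1 => (pvProd fs k).flatMap (fun p => fs.map (fun f => p ++ [f]))

-- one level of A's loop
def pvStep (fs : List (List (String × Int))) (fr : List (List (List (String × Int)))) : List (List (List (String × Int))) :=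
  (fr.foldl (fun nf path => nf ++ fs.map (fun f => path ++ [f])) []).take 1000

-- the digits of i in base (fs.length), least significant first, mapped through fs
def pvDigs (fs : List (List (String × Int))) : Nat → Int → List (List (String × Int))
  | 0, _ => []
  | k+1, i =>
      PySem.List.pyGetD fs (PySem.Int.mod i (fs.length : Int)) []
        :: pvDigs fs k (PySem.Int.floordiv i (fs.length : Int))

-- the path B builds for index i
def pvElem (fields : List (List (String × Int))) (D : Nat) (i : Int) : List (List (String × Int)) :=
  ((List.range D).foldl
    (fun (st : Int × List (List (String × Int))) _ =>
      (PySem.Int.floordiv st.1 (fields.length : Int),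
       st.2 ++ [PySem.List.pyGetD fields (PySem.Int.mod st.1 (fields.length : Int)) []]))
    (i, ([] : List (List (String × Int))))).2.reverse

lemma pvFoldl_ignore {α β : Type} (step : β → β) : ∀ (l : List α) (init : β),
    l.foldl (fun b _ => step b) init = step^[l.length] init := by
  intro l
  induction l with
  | nil => intro init; rfl
  | cons x t ih =>
      intro init
      simp [List.foldl_cons, ih, Function.iterate_succ_apply]

lemma pvFoldl_flatMap {α β : Type} (g : α → List β) : ∀ (l : List α) (init : List β),
    l.foldl (fun nf p => nf ++ g p) init = init ++ l.flatMap g := by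
  intro l
  induction l with
  | nil => intro init; simp
  | cons x t ih => intro init; simp [List.foldl_cons, ih]

lemma pvFoldl_singleton {α β : Type} (g : α → β) : ∀ (l : List α) (init : List β),
    l.foldl (fun out p => out ++ [g p]) init = init ++ l.map g := by
  intro l
  induction l with
  | nil => intro init; simp
  | cons x t ih => intro init; simp [List.foldl_cons, ih]

lemma pvTake_flatMap {α β : Type} (g : α → List β) (n : Nat)
    (hg : ∀ x, (g x).length = n) : ∀ (l : List α) (m : Nat),
    (l.take m).flatMap g = (l.flatMap g).take (m * n) := by
  intro l
  induction l with
  | nil => intro m; simp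
  | cons x t ih =>
      intro m
      cases m with
      | zero => simp
      | succ j =>
          have h1 : (j + 1) * n = (g x).length + j * n := by rw [hg x]; ring
          simp [List.take_succ_cons, List.flatMap_cons, h1, List.take_append, ih j]

lemma pvProd_length (fs : List (List (String × Int))) :
    ∀ k, (pvProd fs k).length = fs.length ^ k := by
  intro k
  induction k with
  | zero => simp [pvProd]
  | succ k ih =>
      simp [pvProd, List.length_flatMap, ih, pow_succ]

lemma pvFlatMap_get {α β : Type} (g : α → List β) (n : Nat)
    (hg : ∀ x, (g x).length = n) (d : β) (da : α) :
    ∀ (l : List α) (q r : Nat), r < n → q < l.length →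
    (l.flatMap g).getD (q * n + r) d = (g (l.getD q da)).getD r d := by
  intro l
  induction l with
  | nil => intro q r _ hq; simp at hq
  | cons x t ih =>
      intro q r hr hq
      cases q with
      | zero =>
          simp only [List.flatMap_cons]
          rw [List.getD_append _ _ _ _ (by rw [hg x]; omega)]
          simp
      | succ q' =>
          have hge : (g x).length ≤ (q' + 1) * n + r := by rw [hg x]; nlinarith
          simp only [List.flatMap_cons]
          rw [List.getD_append_right _ _ _ _ hge]
          have harith : (q' + 1) * n + r - (g x).length = q' * n + r := by rw [hg x]; ring_nf; omega
          rw [harith]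
          have := ih q' r hr (by simpa using Nat.lt_of_succ_lt_succ hq)
          simpa using this

lemma pvProd_get (fs : List (List (String × Int))) (hfs : fs ≠ []) :
    ∀ (k : Nat) (i : Nat), i < fs.length ^ k →
    (pvProd fs k).getD i [] = (pvDigs fs k (i : Int)).reverse := by
  have hn : 0 < fs.length := List.length_pos_iff.mpr hfs
  intro k
  induction k with
  | zero =>
      intro i hi
      have hi0 : i = 0 := by simpa using hi
      subst hi0
      simp [pvProd, pvDigs]
  | succ k ih =>
      intro i hi
      have hq : i / fs.length < fs.length ^ k := by
        rw [Nat.div_lt_iff_lt_mul hn]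
        calc i < fs.length ^ (k+1) := hi
        _ = fs.length ^ k * fs.length := by ring
      have hr : i % fs.length < fs.length := Nat.mod_lt _ hn
      have hdecomp : i = (i / fs.length) * fs.length + i % fs.length := by
        rw [Nat.mul_comm]; exact (Nat.div_add_mod i fs.length).symm
      have hglen : ∀ p : List (List (String × Int)),
          (fs.map (fun f => p ++ [f])).length = fs.length := by
        intro p; simp
      have hmain := pvFlatMap_get (fun p => fs.map (fun f => p ++ [f])) fs.length hglen
        [] [] (pvProd fs k) (i / fs.length) (i % fs.length) hr
        (by rw [pvProd_length]; exact hq)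
      have hdig : pvDigs fs (k+1) (i : Int)
          = PySem.List.pyGetD fs ((i % fs.length : Nat) : Int) []
            :: pvDigs fs k ((i / fs.length : Nat) : Int) := by
        simp only [pvDigs]
        rw [show ((i : Int)) = ((i : Nat) : Int) from rfl]
        rw [PySem.Int.mod_natCast, PySem.Int.floordiv_natCast]
      rw [show (pvProd fs (k+1)) = (pvProd fs k).flatMap (fun p => fs.map (fun f => p ++ [f])) from rfl]
      rw [← hdecomp] at hmain
      rw [hmain, hdig]
      simp only [List.reverse_cons]
      rw [← ih (i / fs.length) hq]
      have hrm : i % fs.length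
          < (List.map (fun f => (pvProd fs k).getD (i / fs.length) [] ++ [f]) fs).length := by
        simpa using hr
      rw [List.getD_eq_getElem _ _ hrm]
      simp only [List.getElem_map]
      rw [PySem.List.pyGetD_natCast, List.getD_eq_getElem _ _ hr]

lemma pvStep_eq (fs : List (List (String × Int))) (fr : List (List (List (String × Int)))) :
    pvStep fs fr = (fr.flatMap (fun p => fs.map (fun f => p ++ [f]))).take 1000 := by
  unfold pvStep
  rw [pvFoldl_flatMap]
  simp

lemma pvIterA (fs : List (List (String × Int))) (hfs : fs ≠ []) :
    ∀ j : Nat, (pvStep fs)^[j+1] (pvProd fs 1) = (pvProd fs (j+2)).take 1000 := by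
  have hn : 0 < fs.length := List.length_pos_iff.mpr hfs
  intro j
  induction j with
  | zero =>
      rw [Function.iterate_one, pvStep_eq]
      rfl
  | succ j ih =>
      rw [Function.iterate_succ_apply', ih, pvStep_eq]
      have hglen : ∀ p : List (List (String × Int)),
          (fs.map (fun f => p ++ [f])).length = fs.length := by intro p; simp
      rw [pvTake_flatMap _ fs.length hglen]
      rw [show ((pvProd fs (j+2)).flatMap fun p => fs.map fun f => p ++ [f]) = pvProd fs (j+3) from rfl]
      rw [List.take_take]
      congr 1
      have : 1000 ≤ 1000 * fs.length := Nat.le_mul_of_pos_right _ hn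
      omega

lemma pvMap_getD_range {α : Type} (l : List α) (d : α) (m : Nat) (hm : m ≤ l.length) :
    (List.range m).map (fun j => l.getD j d) = l.take m := by
  apply List.ext_getElem
  · simp [hm]
  · intro j h1 h2
    simp only [List.getElem_map, List.getElem_range, List.getElem_take]
    rw [List.getD_eq_getElem _ _ (by simp at h1; omega)]

-- B's inner loop computes the digit list
lemma pvLoop_spec (fs : List (List (String × Int))) :
    ∀ (l : List Nat) (i : Int) (acc : List (List (String × Int))),
    (l.foldl (fun (st : Int × List (List (String × Int))) _ =>
        (PySem.Int.floordiv st.1 (fs.length : Int), st.2 ++ [PySem.List.pyGetD fs (PySem.Int.mod st.1 (fs.length : Int)) []]))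
      (i, acc)).2 = acc ++ pvDigs fs l.length i := by
  intro l
  induction l with
  | nil => intro i acc; simp [pvDigs]
  | cons x t ih =>
      intro i acc
      simp only [List.foldl_cons, List.length_cons]
      rw [ih]
      simp [pvDigs]

lemma pvElem_eq (fs : List (List (String × Int))) (hfs : fs ≠ []) (D : Nat) (k : Nat)
    (hk : k < fs.length ^ D) :
    pvElem fs D (k : Int) = (pvProd fs D).getD k [] := by
  unfold pvElem
  rw [pvLoop_spec fs (List.range D) (k : Int) []]
  simp only [List.length_range, List.nil_append]
  rw [pvProd_get fs hfs D k hk]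

theorem generate_field_paths_spec : Claim_equal_generate_field_paths := by
  unfold Claim_equal_generate_field_paths Spec_generate_field_paths
  intro fields max_depth _
  by_cases hd : max_depth ≤ 1
  · -- loop never runs in A; B takes the first branch
    unfold generate_field_paths generate_field_paths_alt
    rw [if_pos hd, PySem.List.pyRange_one_eq_nil (by omega)]
    rfl
  · push_neg at hd
    have hd2 : 2 ≤ max_depth := hd
    set D : Nat := max_depth.toNat with hD
    have hD2 : 2 ≤ D := by omega
    set m : Nat := (min max_depth 10).toNat with hm
    have hm2 : 2 ≤ m := by omega
    have hmD : m ≤ D := by omega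
    set T : Int := min 1000 ((fields.length : Int) ^ m) with hT
    have hAside : generate_field_paths fields max_depth
        = (pvStep fields)^[(max_depth - 1).toNat] (fields.map fun f => [f]) := by
      unfold generate_field_paths
      refine Eq.trans (pvFoldl_ignore (pvStep fields) _ _) ?_
      rw [PySem.List.length_pyRange_one]
      norm_num
    have hBside : generate_field_paths_alt fields max_depth
        = (PySem.List.pyRange 0 T 1).map (pvElem fields D) := by
      unfold generate_field_paths_alt
      rw [if_neg (by omega)]
      refine Eq.trans (pvFoldl_singleton (pvElem fields D) _ _) ?_
      simp only [List.nil_append]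
      rfl
    rw [hAside, hBside]
    by_cases hfs : fields = []
    · -- empty fields: both sides are []
      subst hfs
      have hiter : ∀ j : Nat, (pvStep ([] : List (List (String × Int))))^[j] [] = [] := by
        intro j
        apply Function.iterate_fixed
        rfl
      simp only [List.map_nil]
      rw [hiter]
      have hT0 : T = 0 := by
        rw [hT]
        simp [zero_pow (by omega : m ≠ 0)]
      rw [hT0, PySem.List.pyRange_one_eq_nil (by omega)]
      rfl
    · have hnpos : 0 < fields.length := List.length_pos_iff.mpr hfs
      -- A side: equals (pvProd fields D).take 1000
      obtain ⟨j, hj⟩ : ∃ j, (max_depth - 1).toNat = j + 1 := ⟨(max_depth - 1).toNat - 1, by omega⟩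
      have hP1 : fields.map (fun f => [f]) = pvProd fields 1 := by
        simp [pvProd, List.flatMap]
      rw [hP1, hj, pvIterA fields hfs j]
      have hjD : j + 2 = D := by omega
      rw [hjD]
      -- B side: the map over the range is a take of pvProd
      have hnm : (0:Int) ≤ (fields.length : Int) ^ m := by positivity
      have hT0 : 0 ≤ T := le_min (by norm_num) hnm
      have hcast : ((fields.length : Int) ^ m) = ((fields.length ^ m : Nat) : Int) := by
        push_cast; ring
      have hTle : T.toNat ≤ fields.length ^ D := by
        by_cases hc : fields.length ^ m < 1000
        · have heq : fields.length ^ m = fields.length ^ D := by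
            rcases Nat.lt_or_ge fields.length 2 with h1 | h1
            · interval_cases h : fields.length <;> simp_all
            · have h10 : m = D := by
                by_contra hne
                have hm10 : m = 10 := by omega
                have : 2 ^ 10 ≤ fields.length ^ m := by
                  rw [hm10]; exact Nat.pow_le_pow_left h1 10
                omega
              rw [h10]
          have h2 : T ≤ (fields.length : Int) ^ m := min_le_right _ _
          omega
        · have h2 : T ≤ 1000 := min_le_left _ _
          have hpow : 1000 ≤ fields.length ^ D := by
            calc (1000:Nat) ≤ fields.length ^ m := by omega
            _ ≤ fields.length ^ D := Nat.pow_le_pow_right hnpos hmD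
          omega
      have hrange : PySem.List.pyRange 0 T 1 = (List.range T.toNat).map (fun k : Nat => (k : Int)) := by
        rw [PySem.List.pyRange_one]
        simp only [Int.sub_zero]
        exact List.map_congr_left (fun k _ => by omega)
      rw [hrange, List.map_map]
      have hstep1 : (List.range T.toNat).map (pvElem fields D ∘ fun k : Nat => (k : Int))
          = (pvProd fields D).take T.toNat := by
        refine Eq.trans (List.map_congr_left ?_)
          (pvMap_getD_range (pvProd fields D) [] T.toNat (by rw [pvProd_length]; exact hTle))
        intro k hk
        simp only [List.mem_range] at hk
        simpa [Function.comp] using pvElem_eq fields hfs D k (by omega)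
      rw [hstep1]
      -- finally (pvProd D).take 1000 = (pvProd D).take T.toNat
      by_cases hc : fields.length ^ m < 1000
      · have heq : fields.length ^ m = fields.length ^ D := by
          rcases Nat.lt_or_ge fields.length 2 with h1 | h1
          · interval_cases h : fields.length <;> simp_all
          · have h10 : m = D := by
              by_contra hne
              have hm10 : m = 10 := by omega
              have : 2 ^ 10 ≤ fields.length ^ m := by
                rw [hm10]; exact Nat.pow_le_pow_left h1 10
              omega
            rw [h10]
        have hTeq : T.toNat = fields.length ^ D := by
          have hTv : T = (fields.length : Int) ^ m := min_eq_right (by omega)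
          omega
        rw [hTeq, List.take_of_length_le (by rw [pvProd_length]; omega),
            List.take_of_length_le (by simp [pvProd_length])]
      · have hTeq : T.toNat = 1000 := by
          have hTv : T = 1000 := min_eq_left (by omega)
          omega
        rw [hTeq]
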